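-- pv_equiv track=rewrite | github.com/miclaldogan/bantz | tests/test_issue_1013_streaming_tokens.py | _simulate_stream
-- ===== SOURCE A (Python) =====
-- from dataclasses import dataclass
-- from typing import Optional, Any
--
-- @dataclass
-- class FakeUsage:
--     completion_tokens: int = 0
--     prompt_tokens: int = 0
--     total_tokens: int = 0
--
-- @dataclass
-- class FakeDelta:
--     content: Optional[str] = None
--
-- @dataclass
-- class FakeChoice:
--     delta: FakeDelta = None
--     finish_reason: Optional[str] = None
--
--     def __post_init__(self):
--         if self.delta is None:
--             self.delta = FakeDelta()
--
-- @dataclass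
-- class FakeChunk:
--     choices: list = None
--     usage: Any = None
--
--     def __post_init__(self):
--         if self.choices is None:
--             self.choices = []
--
-- def _simulate_stream(chunks_content: list[str], usage_tokens: int | None = None):
--     """Simulate streaming and return final total_tokens.
--
--     Mimics the logic from vllm_openai_client.py stream_chat.
--     """
--     total_tokens = 0
--     total_content_chars = 0
--     chunk_count = 0
--
--     for i, text in enumerate(chunks_content):
--         is_last = (i == len(chunks_content) - 1)
--
--         # Simulate chunk
--         chunk = FakeChunk(
--             choices=[FakeChoice(
--                 delta=FakeDelta(content=text),
--                 finish_reason="stop" if is_last else None,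
--             )],
--             usage=FakeUsage(completion_tokens=usage_tokens) if (is_last and usage_tokens) else None,
--         )
--
--         # Usage extraction (same logic as vllm_openai_client.py)
--         if hasattr(chunk, "usage") and chunk.usage:
--             usage = chunk.usage
--             if hasattr(usage, "completion_tokens") and usage.completion_tokens:
--                 total_tokens = int(usage.completion_tokens)
--
--         content = chunk.choices[0].delta.content or ""
--         if content:
--             chunk_count += 1
--             total_content_chars += len(content)
--
--     # Fallback estimation
--     if total_tokens == 0 and total_content_chars > 0:
--         total_tokens = max(1, total_content_chars // 4)
--
--     return total_tokens
-- ===== SOURCE B (Python) =====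
-- def _simulate_stream(chunks_content: list[str], usage_tokens: int | None = None):
--     """Simulate streaming and return final total_tokens (direct computation)."""
--     if chunks_content and usage_tokens:
--         return int(usage_tokens)
--     total = sum(len(t) for t in chunks_content if t)
--     return max(1, total // 4) if total > 0 else 0
-- ===== Notes on version B (the rewrite author's own statement) =====
-- stated objective: simpler
-- what changed: Drops the per-chunk FakeChunk/FakeUsage simulation loop: the usage path is a single short-circuit (non-empty stream and truthy usage_tokens returns it directly) and otherwise one sum of chunk lengths with the //4 estimate.
import Mathlib
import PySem

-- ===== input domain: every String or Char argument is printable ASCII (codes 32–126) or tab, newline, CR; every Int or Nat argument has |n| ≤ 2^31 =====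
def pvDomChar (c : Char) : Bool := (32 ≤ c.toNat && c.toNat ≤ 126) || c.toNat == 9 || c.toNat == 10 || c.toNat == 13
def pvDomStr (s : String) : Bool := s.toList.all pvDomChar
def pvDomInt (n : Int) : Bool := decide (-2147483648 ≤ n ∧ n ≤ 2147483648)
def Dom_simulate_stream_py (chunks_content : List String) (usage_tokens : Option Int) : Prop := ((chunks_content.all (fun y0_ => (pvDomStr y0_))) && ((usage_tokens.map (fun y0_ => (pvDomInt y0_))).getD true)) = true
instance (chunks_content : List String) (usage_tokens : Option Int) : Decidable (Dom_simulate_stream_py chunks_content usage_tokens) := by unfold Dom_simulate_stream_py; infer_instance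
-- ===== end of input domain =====

-- B replaces A's per-chunk FakeChunk/FakeUsage simulation loop by a short-circuit on the
-- usage path plus a single sum of chunk lengths (objective: simpler).

-- ===== PORT A =====
-- Python truthiness of `usage_tokens : int | None`
def pvTruthyOpt (ut : Option Int) : Bool :=
  match ut with
  | some u => u != 0
  | none => false

-- the body of A's for-loop; state = (total_tokens, total_content_chars, chunk_count)
def pvStepA (n : Int) (ut : Option Int) (st : Int × Int × Int) (p : Int × String) : Int × Int × Int :=
  let tt := st.1
  let tcc := st.2.1
  let cc := st.2.2
  let is_last := p.1 == n - 1
  -- usage = FakeUsage(completion_tokens=usage_tokens) if (is_last and usage_tokens) else None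
  let usage : Option Int := if is_last && pvTruthyOpt ut then some (ut.getD 0) else none
  -- if chunk.usage: (a FakeUsage instance is always truthy) … if usage.completion_tokens: total_tokens = int(...)
  let tt := match usage with
    | some c => if c != 0 then c else tt
    | none => tt
  let content := p.2   -- delta.content or "" : content is the text itself (None never occurs here)
  if content != "" then (tt, tcc + PySem.Str.len content, cc + 1) else (tt, tcc, cc)

def simulate_stream_py (chunks_content : List String) (usage_tokens : Option Int) : Int :=
  let n : Int := chunks_content.length
  let st := (PySem.List.enumerate chunks_content).foldl (pvStepA n usage_tokens) (0, 0, 0)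
  if st.1 == 0 && st.2.1 > 0 then max 1 (PySem.Int.floordiv st.2.1 4) else st.1

-- ===== PORT B =====
def simulate_stream_py_alt (chunks_content : List String) (usage_tokens : Option Int) : Int :=
  if (!chunks_content.isEmpty) && pvTruthyOpt usage_tokens then usage_tokens.getD 0
  else
    let total := chunks_content.foldl (fun acc t => if t != "" then acc + PySem.Str.len t else acc) (0 : Int)
    if total > 0 then max 1 (PySem.Int.floordiv total 4) else 0

-- ===== PRECONDITION & SPEC =====
def Spec_simulate_stream_py (chunks_content : List String) (usage_tokens : Option Int) (out : Int) : Prop := out = simulate_stream_py_alt chunks_content usage_tokens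
instance (chunks_content : List String) (usage_tokens : Option Int) (out : Int) : Decidable (Spec_simulate_stream_py chunks_content usage_tokens out) := by unfold Spec_simulate_stream_py; infer_instance

-- ===== CLAIM (what is proved, stated in full; the proofs are below) =====
def Claim_equal_simulate_stream_py : Prop := ∀ (chunks_content : List String) (usage_tokens : Option Int), Dom_simulate_stream_py chunks_content usage_tokens → Spec_simulate_stream_py chunks_content usage_tokens (simulate_stream_py chunks_content usage_tokens)

-- ===== LEMMAS AND PROOFS =====

-- when usage_tokens is falsy, A's loop never touches total_tokens and accumulates exactly B's sum
theorem pvFold_notTruthy (ut : Option Int) (h : pvTruthyOpt ut = false) (n : Int) :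
    ∀ (cs : List String) (i tt tcc cc : Int),
      (PySem.List.enumerate cs i).foldl (pvStepA n ut) (tt, tcc, cc) =
        (tt, cs.foldl (fun acc t => if t != "" then acc + PySem.Str.len t else acc) tcc,
             cs.foldl (fun acc t => if t != "" then acc + 1 else acc) cc) := by
  intro cs
  induction cs with
  | nil => intro i tt tcc cc; simp [PySem.List.enumerate_nil]
  | cons x xs ih =>
    intro i tt tcc cc
    simp only [PySem.List.enumerate_cons, List.foldl_cons]
    by_cases hx : x != ""
    · simp [pvStepA, h, hx, ih]
    · simp [pvStepA, h, hx, ih]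

-- when usage_tokens is truthy and the list is non-empty, the loop ends with total_tokens = usage_tokens
theorem pvFold_truthy (ut : Option Int) (h : pvTruthyOpt ut = true) (n : Int) :
    ∀ (cs : List String) (i : Int) (st : Int × Int × Int), cs ≠ [] → i + cs.length = n →
      ((PySem.List.enumerate cs i).foldl (pvStepA n ut) st).1 = ut.getD 0 := by
  intro cs
  induction cs with
  | nil => intro i st hne; exact absurd rfl hne
  | cons x xs ih =>
    intro i st _ hlen
    cases xs with
    | nil =>
      have hi : i == n - 1 := by simp at hlen; simp; omega
      obtain ⟨u, hu, hu0⟩ : ∃ u, ut = some u ∧ u ≠ 0 := by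
        cases ut with
        | none => simp [pvTruthyOpt] at h
        | some u => exact ⟨u, rfl, by simpa [pvTruthyOpt] using h⟩
      by_cases hx : x != "" <;>
        simp [PySem.List.enumerate_cons, PySem.List.enumerate_nil, pvStepA, pvTruthyOpt, hi, hx, hu, hu0]
    | cons y ys =>
      simp only [PySem.List.enumerate_cons, List.foldl_cons]
      exact ih (i + 1) _ (by simp) (by simp at hlen ⊢; omega)

theorem pvTruthy_ne_zero (ut : Option Int) (h : pvTruthyOpt ut = true) : ut.getD 0 ≠ 0 := by
  cases ut with
  | none => simp [pvTruthyOpt] at h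
  | some u => simpa [pvTruthyOpt] using h

-- ===== VERDICT (by name: the statement is the Claim_ definition above) =====
theorem simulate_stream_py_spec : Claim_equal_simulate_stream_py := by
  intro cs ut _
  unfold Spec_simulate_stream_py
  by_cases ht : pvTruthyOpt ut = true
  · cases cs with
    | nil => simp [simulate_stream_py, simulate_stream_py_alt, PySem.List.enumerate_nil]
    | cons x xs =>
      have hfold := pvFold_truthy ut ht ((x :: xs).length : Int) (x :: xs) 0 (0, 0, 0)
        (by simp) (by simp)
      have hne := pvTruthy_ne_zero ut ht
      simp only [simulate_stream_py]
      rw [hfold]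
      simp [simulate_stream_py_alt, ht, hne]
  · have ht' : pvTruthyOpt ut = false := by simpa using ht
    have hfold := pvFold_notTruthy ut ht' (cs.length : Int) cs 0 0 0 0
    simp only [simulate_stream_py]
    rw [hfold]
    simp [simulate_stream_py_alt, ht']
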